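-- pv_equiv track=rewrite | github.com/MarioRojoVicente/LogicalUncertaintyFinal | util.py | distribute_dec
-- ===== SOURCE A (Python) =====
-- def distribute_dec(l: list[int], amount: int) -> list[int]:
--     if amount > sum(l):
--         raise ValueError("Amount to distribute exceeds the total sum")
--
--     for i in range(amount):
--         idx = i % len(l)
--         if l[idx] > 0:
--             l[idx] -= 1
--
--     return l
-- ===== SOURCE B (Python) =====
-- def distribute_dec(l: list[int], amount: int) -> list[int]:
--     if amount > sum(l):
--         raise ValueError("Amount to distribute exceeds the total sum")
--     if amount <= 0:
--         return l
--     n = len(l)  # raises like A would (i % 0) when l is empty and amount > 0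
--     q, r = divmod(amount, n)
--     for i in range(n):
--         v = l[i]
--         if v > 0:
--             l[i] = v - min(q + (1 if i < r else 0), v)
--     return l
-- ===== Notes on version B (the rewrite author's own statement) =====
-- stated objective: alternative
-- what changed: Replaces the element-by-element round-robin decrement loop over range(amount) by a closed form: compute each index's visit count (amount//n plus one for the first amount%n indices) and subtract min(visits, value) from each positive element in a single pass over the list.
import Mathlib
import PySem

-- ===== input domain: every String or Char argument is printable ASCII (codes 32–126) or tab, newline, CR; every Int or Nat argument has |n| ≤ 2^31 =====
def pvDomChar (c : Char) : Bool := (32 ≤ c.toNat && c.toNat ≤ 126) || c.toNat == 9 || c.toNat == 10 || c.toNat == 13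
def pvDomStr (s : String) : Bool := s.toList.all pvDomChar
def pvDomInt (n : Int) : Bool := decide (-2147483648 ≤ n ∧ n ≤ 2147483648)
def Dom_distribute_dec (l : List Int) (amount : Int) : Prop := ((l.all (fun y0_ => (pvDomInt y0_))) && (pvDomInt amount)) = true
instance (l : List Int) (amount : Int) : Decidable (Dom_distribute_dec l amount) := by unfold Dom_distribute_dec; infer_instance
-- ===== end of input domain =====

-- B replaces A's round-robin decrement loop over range(amount) by a closed-form
-- per-index visit count, applied in a single pass over the list. Both Pythons
-- mutate l in place; the equivalence proved here is about the return value.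


-- ===== PORT A =====
-- for i in range(amount): idx = i % len(l); if l[idx] > 0: l[idx] -= 1
-- pyGetD/pySetD are the total forms of l[idx]; under Pre_ the index is always in range.
def distribute_dec (l : List Int) (amount : Int) : List Int :=
  (PySem.List.pyRange 0 amount 1).foldl (fun acc i =>
    let idx := PySem.Int.mod i (PySem.List.len acc)
    if PySem.List.pyGetD acc idx 0 > 0 then
      PySem.List.pySetD acc idx (PySem.List.pyGetD acc idx 0 - 1)
    else acc) l

-- ===== PORT B =====
-- q, r = divmod(amount, n); for i in range(n): if l[i] > 0: l[i] = l[i] - min(q + (1 if i < r else 0), l[i])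
def distribute_dec_alt (l : List Int) (amount : Int) : List Int :=
  if amount ≤ 0 then l
  else
    let n : Int := PySem.List.len l
    let q := PySem.Int.floordiv amount n
    let r := PySem.Int.mod amount n
    l.mapIdx (fun i v => if v > 0 then v - min (q + (if (i : Int) < r then 1 else 0)) v else v)

-- ===== PRECONDITION & SPEC =====
-- Pre_ excludes exactly the inputs on which A raises ValueError (amount > sum(l)).
def Pre_distribute_dec (l : List Int) (amount : Int) : Prop := amount ≤ l.sum
instance (l : List Int) (amount : Int) : Decidable (Pre_distribute_dec l amount) := by unfold Pre_distribute_dec; infer_instance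
def pvWitness_distribute_dec : List Int × Int := ([3, 0, 2, -1], 4)

def Spec_distribute_dec (l : List Int) (amount : Int) (out : List Int) : Prop := out = distribute_dec_alt l amount
instance (l : List Int) (amount : Int) (out : List Int) : Decidable (Spec_distribute_dec l amount out) := by unfold Spec_distribute_dec; infer_instance

-- ===== CLAIM (what is proved, stated in full; the proofs are below) =====
def Claim_equal_distribute_dec : Prop := ∀ (l : List Int) (amount : Int), Dom_distribute_dec l amount → Pre_distribute_dec l amount → Spec_distribute_dec l amount (distribute_dec l amount)

-- ===== LEMMAS AND PROOFS =====

-- number of times index i is visited in the first k iterations of A's loop (n = len l)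
def pvVisits (n k i : Nat) : Nat := k / n + (if i < k % n then 1 else 0)

-- effect on one element of being visited t times
def pvDec (v : Int) (t : Nat) : Int := if v > 0 then v - min (t : Int) v else v

lemma pvDec_step (v : Int) (t : Nat) :
    (if pvDec v t > 0 then pvDec v t - 1 else pvDec v t) = pvDec v (t + 1) := by
  unfold pvDec
  split_ifs with h1 <;> push_cast <;> omega

lemma pvVisits_succ (n k i : Nat) (hn : 0 < n) (hi : i < n) :
    pvVisits n (k + 1) i = pvVisits n k i + (if i = k % n then 1 else 0) := by
  unfold pvVisits
  have hk : n * (k / n) + k % n = k := Nat.div_add_mod k n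
  have hr : k % n < n := Nat.mod_lt _ hn
  set q := k / n with hq
  set r := k % n with hrdef
  have hk1 : k + 1 = r + 1 + n * q := by omega
  rcases Nat.lt_or_ge (r + 1) n with hlt | hge
  · have hd : (k + 1) / n = q := by
      rw [hk1, Nat.add_mul_div_left _ _ hn, Nat.div_eq_of_lt hlt]; omega
    have hm : (k + 1) % n = r + 1 := by
      rw [hk1, Nat.add_mul_mod_self_left, Nat.mod_eq_of_lt hlt]
    rw [hd, hm]; split_ifs <;> omega
  · have hrn : r + 1 = n := by omega
    have hd : (k + 1) / n = q + 1 := by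
      rw [hk1, Nat.add_mul_div_left _ _ hn, hrn, Nat.div_self hn]; omega
    have hm : (k + 1) % n = 0 := by
      rw [hk1, Nat.add_mul_mod_self_left, hrn, Nat.mod_self]
    rw [hd, hm]; split_ifs <;> omega

-- A's loop body over an intermediate state that is l elementwise-decremented
lemma pvLoop (l : List Int) (hl : 0 < l.length) (k : Nat) :
    (List.range k).foldl (fun (acc : List Int) (j : Nat) =>
        let idx := PySem.Int.mod (j : Int) (PySem.List.len acc)
        if PySem.List.pyGetD acc idx 0 > 0 then
          PySem.List.pySetD acc idx (PySem.List.pyGetD acc idx 0 - 1)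
        else acc) l
      = l.mapIdx (fun i v => pvDec v (pvVisits l.length k i)) := by
  induction k with
  | zero =>
    simp [pvVisits, pvDec]
    refine (List.ext_getElem (by simp) ?_).symm
    intro i h1 h2
    simp
    omega
  | succ k ih =>
    rw [List.range_succ, List.foldl_append, List.foldl_cons, List.foldl_nil, ih]
    have hmlt : k % l.length < l.length := Nat.mod_lt _ hl
    have hlenm : (l.mapIdx (fun i v => pvDec v (pvVisits l.length k i))).length = l.length := by
      simp
    have hmod : PySem.Int.mod (k : Int)
        (PySem.List.len (l.mapIdx (fun i v => pvDec v (pvVisits l.length k i))))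
        = ((k % l.length : Nat) : Int) := by
      rw [PySem.List.len_eq, hlenm]
      exact_mod_cast PySem.Int.mod_natCast k l.length
    simp only [hmod, PySem.List.pyGetD_natCast, PySem.List.pySetD_natCast]
    have hgetD : (l.mapIdx (fun i v => pvDec v (pvVisits l.length k i))).getD (k % l.length) 0
        = pvDec l[k % l.length] (pvVisits l.length k (k % l.length)) := by
      rw [List.getD_eq_getElem?_getD, List.getElem?_eq_getElem (by omega)]
      simp
    rw [hgetD]
    apply List.ext_getElem?
    intro i
    by_cases hi : i < l.length
    · have hv := pvVisits_succ l.length k i hl hi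
      by_cases hieq : i = k % l.length
      · subst hieq
        rw [if_pos rfl] at hv
        split_ifs with hpos
        · rw [List.getElem?_set_self (by omega)]
          simp only [List.getElem?_mapIdx, List.getElem?_eq_getElem hi, Option.map_some, hv,
            ← pvDec_step, if_pos hpos]
        · simp only [List.getElem?_mapIdx, List.getElem?_eq_getElem hi, Option.map_some, hv,
            ← pvDec_step, if_neg hpos]
      · rw [if_neg hieq] at hv
        have hL : (if pvDec l[k % l.length] (pvVisits l.length k (k % l.length)) > 0 then
              (l.mapIdx (fun i v => pvDec v (pvVisits l.length k i))).set (k % l.length)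
                (pvDec l[k % l.length] (pvVisits l.length k (k % l.length)) - 1)
            else l.mapIdx (fun i v => pvDec v (pvVisits l.length k i)))[i]?
            = (l.mapIdx (fun i v => pvDec v (pvVisits l.length k i)))[i]? := by
          split_ifs with hpos
          · exact List.getElem?_set_ne (fun h => hieq h.symm)
          · rfl
        rw [hL]
        simp only [List.getElem?_mapIdx, List.getElem?_eq_getElem hi, Option.map_some, hv,
          Nat.add_zero]
    · have hi' : l.length ≤ i := by omega
      have hL : (if pvDec l[k % l.length] (pvVisits l.length k (k % l.length)) > 0 then
            (l.mapIdx (fun i v => pvDec v (pvVisits l.length k i))).set (k % l.length)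
              (pvDec l[k % l.length] (pvVisits l.length k (k % l.length)) - 1)
          else l.mapIdx (fun i v => pvDec v (pvVisits l.length k i))).length = l.length := by
        split_ifs <;> simp
      rw [List.getElem?_eq_none (by omega), List.getElem?_eq_none (by simp; omega)]

-- ===== VERDICT (by name: the statement is the Claim_ definition above) =====
theorem distribute_dec_spec : Claim_equal_distribute_dec := by
  intro l amount _ hpre
  unfold Spec_distribute_dec distribute_dec distribute_dec_alt
  by_cases hle : amount ≤ 0
  · rw [if_pos hle, PySem.List.pyRange_one_eq_nil hle, List.foldl_nil]
  · rw [if_neg hle]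
    replace hle : 0 < amount := by omega
    have hl : 0 < l.length := by
      by_contra h
      have : l = [] := by
        cases l with
        | nil => rfl
        | cons a t => simp at h
      subst this
      simp [Pre_distribute_dec] at hpre
      omega
    have hN : amount = ((amount.toNat : Nat) : Int) := by omega
    rw [PySem.List.pyRange_one]
    have h0 : (amount - 0).toNat = amount.toNat := by omega
    rw [h0, List.foldl_map]
    simp only [zero_add]
    rw [pvLoop l hl amount.toNat, PySem.List.len_eq]
    have hq : PySem.Int.floordiv amount (l.length : Int)
        = ((amount.toNat / l.length : Nat) : Int) := by
      rw [hN]; exact_mod_cast PySem.Int.floordiv_natCast amount.toNat l.length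
    have hr : PySem.Int.mod amount (l.length : Int)
        = ((amount.toNat % l.length : Nat) : Int) := by
      rw [hN]; exact_mod_cast PySem.Int.mod_natCast amount.toNat l.length
    rw [hq, hr]
    have hfun : (fun (i : Nat) (v : Int) => pvDec v (pvVisits l.length amount.toNat i))
        = (fun (i : Nat) (v : Int) => if v > 0 then
            v - min (((amount.toNat / l.length : Nat) : Int)
              + if (i : Int) < ((amount.toNat % l.length : Nat) : Int) then 1 else 0) v
            else v) := by
      funext i v
      simp only [pvDec, pvVisits, Nat.cast_add, Nat.cast_ite, Nat.cast_one, Nat.cast_zero,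
        Nat.cast_lt]
    rw [hfun]
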